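-- pv_equiv track=rewrite | github.com/hed0x/malwares-collection | Unknown/Win32.m0yv/m0yv/Core/Shellcode/build_shell_x86.py | get_only_name
-- ===== SOURCE A (Python) =====
-- def get_only_name(file):
--     obj = file.split('\\')
--     obj = obj[len(obj) - 1]
--     obj = obj.split('.')
--     del obj[-1]
--
--     filef = ""
--     for parts in obj:
--         filef += (parts + '.')
--     return (filef.strip('.'))
-- ===== SOURCE B (Python) =====
-- def get_only_name(file):
--     # One reverse pass: skip the extension up to the last '.', collect the stem,
--     # stop at the path separator; no split/join lists are built.
--     stem = []
--     seen_dot = False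
--     for ch in reversed(file):
--         if ch == '\\':
--             break
--         if seen_dot:
--             stem.append(ch)
--         elif ch == '.':
--             seen_dot = True
--     if not seen_dot:
--         return ''
--     stem.reverse()
--     return ''.join(stem).strip('.')
-- ===== Notes on version B (the rewrite author's own statement) =====
-- stated objective: alternative
-- what changed: A splits on the backslash separator, splits the basename on dots, deletes the last piece and rejoins with trailing dots before stripping; B makes a single pass over the reversed string with a (stem, seen_dot) state machine that skips the extension, stops at the separator, and strips dots from the collected stem.
import Mathlib
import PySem

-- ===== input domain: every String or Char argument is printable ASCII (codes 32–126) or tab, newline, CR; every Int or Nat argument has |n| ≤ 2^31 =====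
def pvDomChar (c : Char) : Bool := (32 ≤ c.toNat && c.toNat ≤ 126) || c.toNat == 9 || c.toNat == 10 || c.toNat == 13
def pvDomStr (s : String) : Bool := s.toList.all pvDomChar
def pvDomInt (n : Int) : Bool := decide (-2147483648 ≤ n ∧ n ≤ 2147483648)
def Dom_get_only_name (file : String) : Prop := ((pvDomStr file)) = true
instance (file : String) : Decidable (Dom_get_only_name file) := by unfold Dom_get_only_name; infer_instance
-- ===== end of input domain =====

-- B replaces A's split / delete-last / rejoin traversal with a single scan over the
-- reversed string (alternative decomposition; same return value, no speed claim).

-- ===== PORT A =====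
def get_only_name (file : String) : String :=
  let obj := PySem.Chars.splitOn file.toList ['\\']
  -- obj[len(obj) - 1]: pyGet? is always `some` here (a split with a non-empty separator
  -- is never the empty list), so the .getD [] default is unreachable
  let obj1 := (PySem.List.pyGet? obj ((obj.length : Int) - 1)).getD []
  let obj2 := PySem.Chars.splitOn obj1 ['.']
  -- del obj[-1]: exact, obj2 is non-empty for the same reason, so Python never raises here
  let obj3 := obj2.dropLast
  let filef := obj3.foldl (fun filef parts => filef ++ (parts ++ ['.'])) []
  String.ofList (PySem.Chars.stripChars filef ['.'])

-- ===== PORT B =====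
-- the for-loop of Source B (with its `break`) as a structural recursion over the reversed chars;
-- the pair (stem, seen_dot) is the loop state
def altLoop : List Char → List Char → Bool → List Char × Bool
  | [], stem, seen => (stem, seen)
  | ch :: rest, stem, seen =>
    if ch = '\\' then (stem, seen)
    else if seen then altLoop rest (stem ++ [ch]) seen
    else if ch = '.' then altLoop rest stem true
    else altLoop rest stem seen

def get_only_name_alt (file : String) : String :=
  let r := altLoop file.toList.reverse [] false
  if r.2 then String.ofList (PySem.Chars.stripChars r.1.reverse ['.']) else ""

-- ===== PRECONDITION & SPEC =====
def Spec_get_only_name (file : String) (out : String) : Prop := out = get_only_name_alt file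
instance (file : String) (out : String) : Decidable (Spec_get_only_name file out) := by unfold Spec_get_only_name; infer_instance

-- ===== CLAIM (what is proved, stated in full; the proofs are below) =====
def Claim_equal_get_only_name : Prop := ∀ (file : String), Dom_get_only_name file → Spec_get_only_name file (get_only_name file)

-- ===== LEMMAS AND PROOFS =====

def mySplit (s : Char) : List Char → List (List Char)
  | [] => [[]]
  | c :: rest =>
    if c = s then [] :: mySplit s rest
    else
      match mySplit s rest with
      | [] => [[c]]
      | h :: t => (c :: h) :: t
def appendHead (pre : List Char) : List (List Char) → List (List Char)
  | [] => [pre]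
  | h :: t => (pre ++ h) :: t

theorem mySplit_ne_nil (s : Char) (cs : List Char) : mySplit s cs ≠ [] := by
  cases cs with
  | nil => simp [mySplit]
  | cons c rest =>
    simp only [mySplit]
    split
    · simp
    · split <;> simp_all

theorem splitOn_go_eq (s : Char) :
    ∀ (fuel : Nat) (l cur : List Char) (acc : List (List Char)), l.length ≤ fuel →
      PySem.Chars.splitOn.go [s] fuel l cur acc =
        acc.reverse ++ appendHead cur.reverse (mySplit s l) := by
  intro fuel
  induction fuel with
  | zero =>
    intro l cur acc h
    have : l = [] := by cases l <;> simp_all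
    subst this
    simp [PySem.Chars.splitOn.go, mySplit, appendHead]
  | succ n ih =>
    intro l cur acc h
    cases l with
    | nil => simp [PySem.Chars.splitOn.go, mySplit, appendHead]
    | cons c rest =>
      rw [PySem.Chars.splitOn.go]
      simp only [List.length_cons, Nat.add_le_add_iff_right] at h
      rcases hr : mySplit s rest with _ | ⟨h1, t⟩
      · exact absurd hr (mySplit_ne_nil s rest)
      by_cases hc : c = s
      · subst hc
        have hpre : [c].isPrefixOf (c :: rest) = true := by simp [List.isPrefixOf]
        rw [if_pos hpre]
        simp only [List.length_cons, List.length_nil, Nat.zero_add, List.drop_succ_cons, List.drop_zero]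
        rw [ih rest [] (cur.reverse :: acc) h]
        simp [mySplit, hr, appendHead]
      · have hpre : [s].isPrefixOf (c :: rest) = false := by
          simp [List.isPrefixOf]
          intro h'; exact absurd h'.symm hc
        rw [if_neg (by simp [hpre])]
        rw [ih rest (c :: cur) acc h]
        simp [mySplit, hr, appendHead, hc]

theorem splitOn_eq_mySplit (s : Char) (cs : List Char) :
    PySem.Chars.splitOn cs [s] = mySplit s cs := by
  rw [PySem.Chars.splitOn, splitOn_go_eq s (cs.length + 1) cs [] [] (by omega)]
  rcases hr : mySplit s cs with _ | ⟨h1, t⟩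
  · exact absurd hr (mySplit_ne_nil s cs)
  · simp [appendHead]

theorem mySplit_of_not_mem {s : Char} {cs : List Char} (h : s ∉ cs) : mySplit s cs = [cs] := by
  induction cs with
  | nil => simp [mySplit]
  | cons c rest ih =>
    simp only [List.mem_cons, not_or] at h
    rw [mySplit, if_neg (fun hc : c = s => h.1 hc.symm), ih h.2]
  
theorem two_le_length_mySplit {s : Char} {cs : List Char} (h : s ∈ cs) :
    2 ≤ (mySplit s cs).length := by
  induction cs with
  | nil => simp at h
  | cons c rest ih =>
    by_cases hc : c = s
    · subst hc
      rw [mySplit, if_pos rfl]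
      have := List.length_pos_iff.mpr (mySplit_ne_nil c rest)
      simp only [List.length_cons]
      omega
    · have hs : s ∈ rest := by rcases List.mem_cons.mp h with h1 | h1; exact absurd h1.symm hc; exact h1
      have := ih hs
      rw [mySplit, if_neg hc]
      rcases hr : mySplit s rest with _ | ⟨h1, t⟩
      · exact absurd hr (mySplit_ne_nil s rest)
      · rw [hr] at this; simpa using this

theorem takeWhile_append_singleton_neg {p : Char → Bool} {a : Char} (xs : List Char)
    (ha : p a = false) : (xs ++ [a]).takeWhile p = xs.takeWhile p := by
  rw [List.takeWhile_append]
  split_ifs with hlen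
  · rw [(List.takeWhile_prefix p).eq_of_length hlen]
    simp [List.takeWhile, ha]
  · rfl

theorem getLastD_mySplit (s : Char) (cs : List Char) :
    (mySplit s cs).getLastD [] = (cs.reverse.takeWhile (fun c => c != s)).reverse := by
  induction cs with
  | nil => simp [mySplit]
  | cons c rest ih =>
    by_cases hc : c = s
    · subst hc
      rw [mySplit, if_pos rfl, List.getLastD_cons]
      rw [List.reverse_cons, takeWhile_append_singleton_neg _ (by simp)]
      exact ih
    · by_cases hs : s ∈ rest
      · rw [mySplit, if_neg hc]
        rcases hr : mySplit s rest with _ | ⟨h1, t⟩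
        · exact absurd hr (mySplit_ne_nil s rest)
        have ht : t ≠ [] := by
          have := two_le_length_mySplit hs
          rw [hr] at this
          cases t <;> simp_all
        have hstop : ((rest.reverse).takeWhile (fun c => c != s)).length ≠ rest.reverse.length := by
          intro hlen
          have heq := (List.takeWhile_prefix (l := rest.reverse) (fun c => c != s)).eq_of_length hlen
          have : s ∈ rest.reverse.takeWhile (fun c => c != s) := by rw [heq]; simpa using hs
          have := List.mem_takeWhile_imp this
          simp at this
        rw [List.reverse_cons, List.takeWhile_append, if_neg hstop]
        rw [hr] at ih
        rw [← ih, List.getLastD_cons, List.getLastD_cons]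
        cases t with
        | nil => exact absurd rfl ht
        | cons t1 ts =>
          rcases hgl : (t1 :: ts).getLast? with _ | v
          · simp [List.getLast?_eq_none_iff] at hgl
          · simp [List.getLastD_eq_getLast?, hgl]
      · rw [mySplit, if_neg hc, mySplit_of_not_mem hs]
        have hall : rest.reverse.takeWhile (fun c => c != s) = rest.reverse := by
          rw [List.takeWhile_eq_self_iff]
          intro x hx
          simp only [bne_iff_ne, ne_eq]
          intro hxs; subst hxs; exact hs (by simpa using hx)
        rw [List.reverse_cons, List.takeWhile_append, if_pos (by rw [hall])]
        simp [List.takeWhile, show (c != s) = true by simpa using hc]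

theorem dropWhile_ne_nil_of_mem {s : Char} {xs : List Char} (h : s ∈ xs) :
    xs.dropWhile (fun c => c != s) ≠ [] := by
  intro hnil
  have := (List.dropWhile_eq_nil_iff).mp hnil s h
  simp at this

theorem flatMap_dropLast_mySplit (s : Char) (cs : List Char) :
    (mySplit s cs).dropLast.flatMap (fun p => p ++ [s]) =
      ((cs.reverse.dropWhile (fun c => c != s)).tail).reverse ++
        (if s ∈ cs then [s] else []) := by
  induction cs with
  | nil => simp [mySplit]
  | cons c rest ih =>
    by_cases hc : c = s
    · subst hc
      rw [mySplit, if_pos rfl,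
          List.dropLast_cons_of_ne_nil (mySplit_ne_nil c rest), List.flatMap_cons,
          List.reverse_cons, if_pos (List.mem_cons_self)]
      by_cases hs : c ∈ rest
      · rw [if_pos hs] at ih
        have hne := dropWhile_ne_nil_of_mem (show c ∈ rest.reverse by simpa using hs)
        rw [List.dropWhile_append, if_neg (by simp [List.isEmpty_iff, hne]),
            List.tail_append_of_ne_nil hne, List.reverse_append, ih]
        simp
      · rw [if_neg hs] at ih
        have hall : rest.reverse.dropWhile (fun c' => c' != c) = [] := by
          rw [List.dropWhile_eq_nil_iff]
          intro x hx
          simp only [bne_iff_ne, ne_eq]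
          intro hxc; subst hxc; exact hs (by simpa using hx)
        rw [List.dropWhile_append, if_pos (by simp [hall])]
        rw [hall] at ih
        simp only [List.tail_nil, List.reverse_nil, List.append_nil] at ih
        simp [List.dropWhile, ih]
    · by_cases hs : s ∈ rest
      · rcases hr : mySplit s rest with _ | ⟨h1, t⟩
        · exact absurd hr (mySplit_ne_nil s rest)
        have ht : t ≠ [] := by
          have := two_le_length_mySplit hs
          rw [hr] at this
          cases t <;> simp_all
        rw [mySplit, if_neg hc, hr, List.dropLast_cons_of_ne_nil ht, List.flatMap_cons]
        rw [hr, List.dropLast_cons_of_ne_nil ht, List.flatMap_cons, if_pos hs] at ih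
        have hne := dropWhile_ne_nil_of_mem (show s ∈ rest.reverse by simpa using hs)
        rw [List.reverse_cons, List.dropWhile_append,
            if_neg (by simp [List.isEmpty_iff, hne]),
            List.tail_append_of_ne_nil hne, List.reverse_append,
            if_pos (List.mem_cons_of_mem c hs)]
        simp only [List.reverse_cons, List.reverse_nil, List.nil_append,
          List.cons_append, List.append_assoc] at ih ⊢
        rw [← ih]
      · have hsc : s ∉ c :: rest := by
          simp only [List.mem_cons, not_or]
          exact ⟨fun h => hc h.symm, hs⟩
        rw [mySplit_of_not_mem hsc]
        have hall : rest.reverse.dropWhile (fun c' => c' != s) = [] := by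
          rw [List.dropWhile_eq_nil_iff]
          intro x hx
          simp only [bne_iff_ne, ne_eq]
          intro hxs; subst hxs; exact hs (by simpa using hx)
        rw [List.reverse_cons, List.dropWhile_append, if_pos (by simp [hall])]
        simp [List.dropWhile, show (c != s) = true by simpa using hc, hsc]


theorem strip_append_dot (X : List Char) :
    PySem.Chars.stripChars (X ++ ['.']) ['.'] = PySem.Chars.stripChars X ['.'] := by
  simp only [PySem.Chars.stripChars]
  by_cases h : X.dropWhile (fun c => ['.'].contains c) = []
  · have h' : ∀ x ∈ X, x = '.' := by
      intro x hx
      have := List.dropWhile_eq_nil_iff.mp h x hx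
      simpa using this
    rw [List.dropWhile_append,
        if_pos (by simp [List.isEmpty_iff, List.dropWhile_eq_nil_iff]; exact h'), h]
    simp [List.dropWhile]
  · have h' : ∃ x ∈ X, ¬ x = '.' := by
      by_contra hC
      push Not at hC
      exact h (List.dropWhile_eq_nil_iff.mpr (fun x hx => by simp [hC x hx]))
    rw [List.dropWhile_append,
        if_neg (by simp [List.isEmpty_iff, List.dropWhile_eq_nil_iff]; exact h'),
        List.reverse_append]
    simp

theorem altLoop_takeWhile (xs : List Char) (stem : List Char) (seen : Bool) :
    altLoop xs stem seen = altLoop (xs.takeWhile (fun c => c != '\\')) stem seen := by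
  induction xs generalizing stem seen with
  | nil => rfl
  | cons c rest ih =>
    by_cases hc : c = '\\'
    · subst hc; simp [altLoop, List.takeWhile]
    · rw [altLoop, if_neg hc]
      rw [List.takeWhile, show (c != '\\') = true by simpa using hc]
      rw [altLoop, if_neg hc]
      split_ifs <;> exact ih _ _

theorem altLoop_seen (xs : List Char) (stem : List Char) (h : '\\' ∉ xs) :
    altLoop xs stem true = (stem ++ xs, true) := by
  induction xs generalizing stem with
  | nil => simp [altLoop]
  | cons c rest ih =>
    simp only [List.mem_cons, not_or] at h
    rw [altLoop, if_neg (fun hc : c = '\\' => h.1 hc.symm), if_pos rfl, ih _ h.2]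
    simp

theorem altLoop_not_seen (xs : List Char) (stem : List Char) (h : '\\' ∉ xs) :
    altLoop xs stem false =
      if '.' ∈ xs then (stem ++ (xs.dropWhile (fun c => c != '.')).tail, true)
      else (stem, false) := by
  induction xs generalizing stem with
  | nil => simp [altLoop]
  | cons c rest ih =>
    simp only [List.mem_cons, not_or] at h
    rw [altLoop, if_neg (fun hc : c = '\\' => h.1 hc.symm)]
    simp only [Bool.false_eq_true, if_false]
    by_cases hc : c = '.'
    · subst hc
      rw [if_pos rfl, altLoop_seen rest stem h.2]
      simp [List.dropWhile]
    · rw [if_neg hc, ih _ h.2]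
      rw [List.dropWhile, show (c != '.') = true by simpa using hc]
      by_cases hm : '.' ∈ rest
      · rw [if_pos hm, if_pos (List.mem_cons_of_mem c hm)]
      · rw [if_neg hm, if_neg (by simp [hm]; exact fun h' => hc h'.symm)]



theorem pyGet_last {l : List (List Char)} (h : l ≠ []) :
    (PySem.List.pyGet? l ((l.length : Int) - 1)).getD [] = l.getLastD [] := by
  have hlen : 1 ≤ l.length := List.length_pos_iff.mpr h
  have : ((l.length : Int) - 1) = ((l.length - 1 : Nat) : Int) := by omega
  rw [this, PySem.List.pyGet?_natCast, ← List.getLast?_eq_getElem?, List.getLastD_eq_getLast?]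

theorem main_eq (file : String) : get_only_name file = get_only_name_alt file := by
  unfold get_only_name get_only_name_alt
  simp only [splitOn_eq_mySplit]
  rw [pyGet_last (mySplit_ne_nil _ _), getLastD_mySplit,
      PySem.List.foldl_append_eq_flatMap, flatMap_dropLast_mySplit]
  rw [altLoop_takeWhile, altLoop_not_seen _ _
        (fun hm => by simpa using List.mem_takeWhile_imp hm)]
  simp only [List.reverse_reverse, List.mem_reverse]
  by_cases hm : '.' ∈ file.toList.reverse.takeWhile (fun c => c != '\\')
  · rw [if_pos hm, if_pos hm]
    simp only [List.nil_append, strip_append_dot]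
    simp
  · rw [if_neg hm, if_neg hm]
    have hdw : (file.toList.reverse.takeWhile (fun c => c != '\\')).dropWhile
        (fun c => c != '.') = [] := by
      rw [List.dropWhile_eq_nil_iff]
      intro x hx
      simp only [bne_iff_ne, ne_eq]
      intro hx'; subst hx'; exact hm hx
    rw [hdw]
    rfl

-- ===== VERDICT (by name: the statement is the Claim_ definition above) =====
theorem get_only_name_spec : Claim_equal_get_only_name := by
  intro file _
  unfold Spec_get_only_name
  exact main_eq file
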